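-- pv_equiv track=rewrite | github.com/sefcom/oxidizer-eval | scripts/evaluation/compare_decompilation.py | compute_num_variables
-- ===== SOURCE A (Python) =====
-- def compute_num_variables(code: str) -> int:
--     n = 0
--     started = False
--     for line in code.splitlines():
--         if line.endswith("{"):
--             started = True
--         elif started:
--             if line.strip() == "":
--                 break
--             n += 1
--     return n
-- ===== SOURCE B (Python) =====
-- def compute_num_variables(code: str) -> int:
--     lines = code.splitlines()
--     i = next((k for k, l in enumerate(lines) if l.endswith("{")), None)
--     if i is None:
--         return 0
--     block = []
--     for l in lines[i + 1:]:
--         if l.strip() == "":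
--             break
--         block.append(l)
--     return sum(1 for l in block if not l.endswith("{"))
-- ===== Notes on version B (the rewrite author's own statement) =====
-- stated objective: alternative
-- what changed: Replaces A's single-pass boolean state machine with a three-phase pipeline: locate the first brace-terminated line by index search, slice and collect the lines up to the first blank line, then count the non-brace lines of that block.
import Mathlib
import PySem

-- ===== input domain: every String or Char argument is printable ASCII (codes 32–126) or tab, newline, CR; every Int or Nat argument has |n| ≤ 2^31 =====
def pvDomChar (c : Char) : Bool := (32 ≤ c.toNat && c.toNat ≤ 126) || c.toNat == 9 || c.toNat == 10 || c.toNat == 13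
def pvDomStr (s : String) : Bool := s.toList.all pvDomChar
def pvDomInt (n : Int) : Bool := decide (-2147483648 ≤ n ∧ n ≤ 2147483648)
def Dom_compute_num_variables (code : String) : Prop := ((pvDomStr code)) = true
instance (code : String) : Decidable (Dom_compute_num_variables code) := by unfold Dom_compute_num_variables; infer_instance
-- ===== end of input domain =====

-- B replaces A's single-pass boolean state machine with a three-phase pipeline
-- (find the first '{'-terminated line, take lines until the first blank one,
-- count the non-brace lines); alternative decomposition, same cost.

-- ===== PORT A =====
-- A's loop: state (n, started), with `break` modelled by returning n.
def pvLoopA : List String → Int → Bool → Int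
  | [], n, _ => n
  | l :: ls, n, started =>
    if PySem.Str.endswith l "{" then pvLoopA ls n true
    else if started then
      (if PySem.Str.strip l = "" then n else pvLoopA ls (n + 1) started)
    else pvLoopA ls n started

def compute_num_variables (code : String) : Int :=
  pvLoopA (PySem.Str.splitlines code) 0 false

-- ===== PORT B =====
-- Source B's `for … if strip == "": break else append` loop.
def pvTakeUntilBlank : List String → List String
  | [] => []
  | l :: ls => if PySem.Str.strip l = "" then [] else l :: pvTakeUntilBlank ls

def compute_num_variables_alt (code : String) : Int :=
  let lines := PySem.Str.splitlines code
  match lines.findIdx? (fun l => PySem.Str.endswith l "{") with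
  | none => 0
  | some i =>
    let block := pvTakeUntilBlank (lines.drop (i + 1))
    ((block.filter (fun l => !PySem.Str.endswith l "{")).length : Int)

-- ===== PRECONDITION & SPEC =====
def Spec_compute_num_variables (code : String) (out : Int) : Prop := out = compute_num_variables_alt code
instance (code : String) (out : Int) : Decidable (Spec_compute_num_variables code out) := by unfold Spec_compute_num_variables; infer_instance

-- ===== CLAIM (what is proved, stated in full; the proofs are below) =====
def Claim_equal_compute_num_variables : Prop := ∀ (code : String), Dom_compute_num_variables code → Spec_compute_num_variables code (compute_num_variables code)

-- ===== LEMMAS AND PROOFS =====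

-- A line ending in '{' has a non-empty strip (the '{' survives stripping).
theorem pv_brace_not_blank (l : String) (h : PySem.Str.endswith l "{" = true) :
    ¬ PySem.Str.strip l = "" := by
  intro hs
  have hsuf : ['{'] <:+ l.toList := by
    apply (PySem.Chars.endswith_iff (s := l.toList) (p := ['{'])).mp
    simpa [PySem.Str.endswith] using h
  obtain ⟨xs, hxs⟩ := hsuf
  -- lstrip of a list ending in '{' is non-empty and still ends in '{'
  have hne : PySem.Chars.lstrip l.toList ≠ [] := by
    simp only [PySem.Chars.lstrip, ← hxs]
    intro hnil
    have := (List.dropWhile_eq_nil_iff).mp hnil '{' (by simp)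
    simp [PySem.Chars.isspace] at this
  have hsuf2 : PySem.Chars.lstrip l.toList <:+ xs ++ ['{'] := by
    rw [hxs]; exact List.dropWhile_suffix _
  obtain ⟨ts, hts⟩ := hsuf2
  have hlast : (PySem.Chars.lstrip l.toList).getLast? = some '{' := by
    have h2 : (ts ++ PySem.Chars.lstrip l.toList).getLast?
        = (PySem.Chars.lstrip l.toList).getLast? := List.getLast?_append_of_ne_nil _ hne
    rw [hts] at h2
    simpa using h2.symm
  obtain ⟨zs, hzs⟩ := List.getLast?_eq_some_iff.mp hlast
  have hstrip : PySem.Chars.strip l.toList ≠ [] := by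
    unfold PySem.Chars.strip PySem.Chars.rstrip
    rw [hzs]
    simp [PySem.Chars.isspace]
  apply hstrip
  have : (PySem.Str.strip l).toList = "".toList := by rw [hs]
  simpa [PySem.Str.strip] using this

def pvCountB (ls : List String) : Int :=
  ((pvTakeUntilBlank ls).filter (fun l => !PySem.Str.endswith l "{")).length

theorem pvLoopA_started (ls : List String) : ∀ n : Int, pvLoopA ls n true = n + pvCountB ls := by
  induction ls with
  | nil => intro n; simp [pvLoopA, pvCountB, pvTakeUntilBlank]
  | cons l ls ih =>
    intro n
    by_cases hb : PySem.Str.endswith l "{" = true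
    · have hbl := pv_brace_not_blank l hb
      have e : pvCountB (l :: ls) = pvCountB ls := by
        simp only [pvCountB, pvTakeUntilBlank, if_neg hbl]
        rw [List.filter_cons_of_neg (by rw [hb]; simp)]
      simp only [pvLoopA, if_pos hb, ih, e]
    · by_cases hs : PySem.Str.strip l = ""
      · have e : pvCountB (l :: ls) = 0 := by
          simp only [pvCountB, pvTakeUntilBlank, if_pos hs]
          rfl
        simp only [pvLoopA, if_neg hb, if_pos hs, e, add_zero, if_pos trivial]
      · have e : pvCountB (l :: ls) = 1 + pvCountB ls := by
          simp only [pvCountB, pvTakeUntilBlank, if_neg hs]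
          rw [List.filter_cons_of_pos (by rw [Bool.not_eq_true] at hb; rw [hb]; simp)]
          simp only [List.length_cons]
          push_cast
          ring
        simp only [pvLoopA, if_neg hb, if_neg hs, ih (n + 1), e, if_pos trivial]
        ring

theorem pvLoopA_unstarted (ls : List String) : ∀ n : Int,
    pvLoopA ls n false
      = n + (match ls.findIdx? (fun l => PySem.Str.endswith l "{") with
             | none => 0
             | some i => pvCountB (ls.drop (i + 1))) := by
  induction ls with
  | nil => intro n; simp [pvLoopA]
  | cons l ls ih =>
    intro n
    by_cases hb : PySem.Str.endswith l "{" = true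
    · simp only [pvLoopA, pvLoopA_started, List.findIdx?_cons, hb, if_true]
      rw [List.drop_succ_cons, List.drop_zero]
    · rw [Bool.not_eq_true] at hb
      simp only [pvLoopA, hb, ih n, List.findIdx?_cons,
        Bool.false_eq_true, if_false]
      cases hfi : ls.findIdx? (fun l => PySem.Str.endswith l "{") with
      | none => rfl
      | some i =>
        simp only [Option.map_some]
        rw [List.drop_succ_cons]

-- ===== VERDICT (by name: the statement is the Claim_ definition above) =====
theorem compute_num_variables_spec : Claim_equal_compute_num_variables := by
  intro code _
  unfold Spec_compute_num_variables compute_num_variables compute_num_variables_alt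
  rw [pvLoopA_unstarted]
  cases hfi : (PySem.Str.splitlines code).findIdx? (fun l => PySem.Str.endswith l "{") with
  | none => simp only [hfi, add_zero]
  | some i => simp only [hfi, pvCountB, zero_add]
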